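-- pv_equiv track=rewrite | github.com/galaxyproject/galaxy | lib/galaxy/util/rules_dsl.py | apply
-- ===== SOURCE A (Python) =====
-- def apply(rule, data, sources):
--     rule_value = rule["value"]
--     tag_prefix = f"group:{rule_value}:"
--
--     new_rows = []
--     for index, row in enumerate(data):
--         group_tag_value = None
--         source = sources[index]
--         tags = source["tags"]
--         for tag in sorted(tags):
--             if tag.startswith(tag_prefix):
--                 group_tag_value = tag[len(tag_prefix) :]
--                 break
--
--         if group_tag_value is None:
--             group_tag_value = rule.get("default_value", "")
--
--         new_rows.append(row + [group_tag_value])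
--
--     return new_rows, sources
-- ===== SOURCE B (Python) =====
-- def apply(rule, data, sources):
--     tag_prefix = f"group:{rule['value']}:"
--     default = rule.get("default_value", "")
--     new_rows = []
--     for row, source in zip(data, sources):
--         matching = [t for t in source["tags"] if t.startswith(tag_prefix)]
--         new_rows.append(row + [min(matching)[len(tag_prefix):] if matching else default])
--     return new_rows, sources
-- ===== Notes on version B (the rewrite author's own statement) =====
-- stated objective: faster
-- what changed: Per row, replaces sorting all tags and breaking at the first prefix match with a single linear filter pass followed by min() over the matching tags, and walks data/sources with zip instead of enumerate+indexing.
import Mathlib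
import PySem

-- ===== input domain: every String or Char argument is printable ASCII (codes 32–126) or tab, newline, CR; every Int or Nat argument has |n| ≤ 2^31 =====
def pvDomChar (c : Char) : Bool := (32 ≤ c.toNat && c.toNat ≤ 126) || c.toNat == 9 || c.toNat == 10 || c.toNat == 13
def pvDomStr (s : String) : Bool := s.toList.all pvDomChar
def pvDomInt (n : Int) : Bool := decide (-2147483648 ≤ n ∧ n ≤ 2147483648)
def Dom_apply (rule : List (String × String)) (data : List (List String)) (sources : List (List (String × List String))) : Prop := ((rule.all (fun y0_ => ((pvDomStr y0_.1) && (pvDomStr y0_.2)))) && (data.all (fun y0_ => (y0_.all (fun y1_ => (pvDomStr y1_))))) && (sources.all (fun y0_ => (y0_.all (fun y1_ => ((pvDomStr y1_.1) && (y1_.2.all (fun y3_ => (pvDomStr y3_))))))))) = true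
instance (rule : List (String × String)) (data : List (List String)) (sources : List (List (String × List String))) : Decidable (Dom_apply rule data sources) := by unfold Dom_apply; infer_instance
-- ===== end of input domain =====

-- B replaces A's per-row sort-then-break-at-first-match with one linear filter pass plus min(), and zips data with sources instead of indexing; proved equal on Pre_ (A raises outside it).

-- ===== PORT A =====
-- A's loop body for one (index, row) pair: sort the tags, take the first one with the prefix (break modelled by the Option accumulator)
def pvBreakStep (tagPrefix : List Char) (g : Option String) (tag : String) : Option String :=
  match g with
  | some v => some v  -- after the break nothing changes
  | none =>
    if PySem.Chars.startswith tag.toList tagPrefix then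
      some (String.ofList (PySem.List.slice tag.toList (some (PySem.List.len tagPrefix)) none))
    else none

def pvRowA (tagPrefix : List Char) (rule : List (String × String)) (sources : List (List (String × List String))) (p : Int × List String) : List String :=
  let tags := (PySem.Dict.get? (PySem.Dict.mk ((PySem.List.pyGet? sources p.1).getD [])) "tags").getD []
  let groupTag : Option String :=
    (PySem.List.sorted tags (fun t => t) false).foldl (pvBreakStep tagPrefix) none
  let groupTagValue := match groupTag with
    | none => PySem.Dict.getD (PySem.Dict.mk rule) "default_value" ""
    | some v => v
  p.2 ++ [groupTagValue]

def apply (rule : List (String × String)) (data : List (List String)) (sources : List (List (String × List String))) : List (List String) × (List (List (String × List String))) :=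
  match PySem.Dict.get? (PySem.Dict.mk rule) "value" with
  | none => ([], [])  -- rule["value"] raises KeyError in Python; excluded by Pre_apply
  | some ruleValue =>
    let tagPrefix : List Char := "group:".toList ++ ruleValue.toList ++ ":".toList
    let newRows := (PySem.List.enumerate data 0).foldl (fun acc p => acc ++ [pvRowA tagPrefix rule sources p]) []
    (newRows, sources)

-- ===== PORT B =====
-- B's loop body for one (row, source) pair: filter the matching tags, take min()
def pvRowB (tagPrefix : List Char) (dflt : String) (p : List String × List (String × List String)) : List String :=
  let tags := (PySem.Dict.get? (PySem.Dict.mk p.2) "tags").getD []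
  let matching := tags.filter (fun t => PySem.Chars.startswith t.toList tagPrefix)
  let gv := match PySem.List.min? matching (fun t => t) with
    | none => dflt
    | some m => String.ofList (PySem.List.slice m.toList (some (PySem.List.len tagPrefix)) none)
  p.1 ++ [gv]

def apply_alt (rule : List (String × String)) (data : List (List String)) (sources : List (List (String × List String))) : List (List String) × (List (List (String × List String))) :=
  match PySem.Dict.get? (PySem.Dict.mk rule) "value" with
  | none => ([], sources)  -- rule['value'] raises KeyError in Python; excluded by Pre_apply
  | some ruleValue =>
    let tagPrefix : List Char := "group:".toList ++ ruleValue.toList ++ ":".toList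
    let dflt := PySem.Dict.getD (PySem.Dict.mk rule) "default_value" ""
    ((data.zip sources).map (pvRowB tagPrefix dflt), sources)

-- ===== PRECONDITION & SPEC =====
-- Pre_ excludes exactly the inputs on which the Python A raises: a rule without the "value" key
-- (KeyError), fewer sources than data rows (IndexError), or a used source without "tags" (KeyError).
def Pre_apply (rule : List (String × String)) (data : List (List String)) (sources : List (List (String × List String))) : Prop :=
  (PySem.Dict.get? (PySem.Dict.mk rule) "value").isSome = true
  ∧ data.length ≤ sources.length
  ∧ ∀ src ∈ sources.take data.length, (PySem.Dict.get? (PySem.Dict.mk src) "tags").isSome = true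
instance (rule : List (String × String)) (data : List (List String)) (sources : List (List (String × List String))) : Decidable (Pre_apply rule data sources) := by unfold Pre_apply; infer_instance
def pvWitness_apply : (List (String × String)) × List (List String) × (List (List (String × List String))) :=
  ([("value", "x"), ("default_value", "d")], [["a"], ["b"]],
   [[("tags", ["group:x:z", "group:x:b", "other"])], [("tags", ["nope"])]])
def Spec_apply (rule : List (String × String)) (data : List (List String)) (sources : List (List (String × List String))) (out : List (List String) × (List (List (String × List String)))) : Prop := out = apply_alt rule data sources
instance (rule : List (String × String)) (data : List (List String)) (sources : List (List (String × List String))) (out : List (List String) × (List (List (String × List String)))) : Decidable (Spec_apply rule data sources out) := by unfold Spec_apply; infer_instance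

-- ===== CLAIM (what is proved, stated in full; the proofs are below) =====
def Claim_equal_apply : Prop := ∀ (rule : List (String × String)) (data : List (List String)) (sources : List (List (String × List String))), Dom_apply rule data sources → Pre_apply rule data sources → Spec_apply rule data sources (apply rule data sources)

-- ===== LEMMAS AND PROOFS =====

-- append-accumulate foldl is a map
theorem foldl_push_eq_map {α β : Type} (f : α → β) :
    ∀ (l : List α) (init : List β), l.foldl (fun acc x => acc ++ [f x]) init = init ++ l.map f := by
  intro l
  induction l with
  | nil => simp
  | cons x t ih => intro init; simp [List.foldl_cons, ih]

-- the break has happened: the accumulator stays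
theorem foldl_break_some (tagPrefix : List Char) :
    ∀ (l : List String) (v : String), l.foldl (pvBreakStep tagPrefix) (some v) = some v := by
  intro l
  induction l with
  | nil => intro v; rfl
  | cons x t ih => intro v; simpa [pvBreakStep] using ih v

-- A's break-loop over a list is find?-then-map
theorem foldl_break_eq_find? (tagPrefix : List Char) :
    ∀ (l : List String),
      l.foldl (pvBreakStep tagPrefix) none
      = ((l.find? (fun t => PySem.Chars.startswith t.toList tagPrefix)).map
          (fun t => String.ofList (PySem.List.slice t.toList (some (PySem.List.len tagPrefix)) none))) := by
  intro l
  induction l with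
  | nil => rfl
  | cons x t ih =>
    by_cases hP : PySem.Chars.startswith x.toList tagPrefix = true
    · rw [List.foldl_cons]
      simp only [pvBreakStep, hP, if_pos]
      rw [foldl_break_some,
        List.find?_cons_of_pos (p := fun u : String => PySem.Chars.startswith u.toList tagPrefix) hP]
      rfl
    · rw [List.foldl_cons]
      simp only [pvBreakStep, hP, if_neg, Bool.false_eq_true, not_false_iff]
      rw [ih,
        List.find?_cons_of_neg (p := fun u : String => PySem.Chars.startswith u.toList tagPrefix) (by simpa using hP)]

-- folding the matched value out of the Option
theorem opt_match_map (o : Option String) (f : String → String) (d : String) :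
    (match o.map f with | none => d | some v => v) = (match o with | none => d | some m => f m) := by
  cases o <;> rfl

-- on a ≤-sorted list, the element found by find? is ≤ every element satisfying P
theorem find?_min_of_pairwise {α : Type} [Preorder α] (P : α → Bool) :
    ∀ (s : List α) (m : α), s.Pairwise (· ≤ ·) → s.find? P = some m →
      ∀ y ∈ s, P y = true → m ≤ y := by
  intro s
  induction s with
  | nil => intro m _ h; simp at h
  | cons x t ih =>
    intro m hpw hf y hy hPy
    rcases List.pairwise_cons.mp hpw with ⟨hx, hpwt⟩
    by_cases hP : P x = true
    · rw [List.find?_cons_of_pos hP] at hf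
      obtain rfl : x = m := by injection hf
      rcases List.mem_cons.mp hy with hy | hy
      · exact le_of_eq hy.symm
      · exact hx y hy
    · rw [List.find?_cons_of_neg (by simpa using hP)] at hf
      rcases List.mem_cons.mp hy with hy | hy
      · exact absurd (hy ▸ hPy) hP
      · exact ih m hpwt hf y hy hPy

-- min over the matching elements = first matching element of the sorted list
theorem min?_filter_eq_find?_sorted (l : List String) (P : String → Bool) :
    PySem.List.min? (l.filter P) (fun t => t) = (PySem.List.sorted l (fun t => t) false).find? P := by
  set s := PySem.List.sorted l (fun t => t) false with hs
  have hmem : ∀ x : String, x ∈ s ↔ x ∈ l := by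
    intro x; rw [hs]; exact PySem.List.mem_sorted l (fun t => t) false x
  cases hf : s.find? P with
  | none =>
    have hnone : ∀ x ∈ s, ¬ P x = true := by
      intro x hx
      simpa using List.find?_eq_none.mp hf x hx
    have hfil : l.filter P = [] := by
      apply List.filter_eq_nil_iff.mpr
      intro x hx
      exact hnone x ((hmem x).mpr hx)
    exact (PySem.List.min?_eq_none_iff (l.filter P) (fun t => t)).mpr hfil
  | some m =>
    have hPm : P m = true := List.find?_some hf
    have hms : m ∈ s := List.mem_of_find?_eq_some hf
    have hmf : m ∈ l.filter P := List.mem_filter.mpr ⟨(hmem m).mp hms, hPm⟩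
    have hpw : s.Pairwise (· ≤ ·) := by
      have := PySem.List.sorted_pairwise l (fun t : String => t)
      simpa [hs] using this
    have hmin : ∀ y ∈ l.filter P, m ≤ y := by
      intro y hy
      rcases List.mem_filter.mp hy with ⟨hyl, hPy⟩
      exact find?_min_of_pairwise P s m hpw hf y ((hmem y).mpr hyl) hPy
    cases h2 : PySem.List.min? (l.filter P) (fun t => t) with
    | none =>
      rw [PySem.List.min?_eq_none_iff (l.filter P) (fun t => t)] at h2
      rw [h2] at hmf
      simp at hmf
    | some m2 =>
      have hm2f : m2 ∈ l.filter P := PySem.List.min?_mem h2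
      have hle : m2 ≤ m := PySem.List.min?_isMin h2 m hmf
      have hge : m ≤ m2 := hmin m2 hm2f
      exact congrArg some (le_antisymm hle hge)

-- one row of A equals one row of B (with the index resolved to the zipped source)
theorem row_eq (tagPrefix : List Char) (rule : List (String × String))
    (sources : List (List (String × List String))) (row : List String) (k : Nat)
    (hk : k < sources.length) :
    pvRowA tagPrefix rule sources ((0 : Int) + (k : Int), row)
      = pvRowB tagPrefix (PySem.Dict.getD (PySem.Dict.mk rule) "default_value" "") (row, sources[k]) := by
  unfold pvRowA pvRowB
  have hget : PySem.List.pyGet? sources ((0 : Int) + (k : Int)) = some sources[k] := by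
    rw [zero_add, PySem.List.pyGet?_natCast]
    exact List.getElem?_eq_getElem hk
  rw [hget]
  simp only [Option.getD_some]
  rw [foldl_break_eq_find? tagPrefix, ← min?_filter_eq_find?_sorted, opt_match_map]

-- ===== VERDICT (by name: the statement is the Claim_ definition above) =====
theorem apply_spec : Claim_equal_apply := by
  intro rule data sources _hdom hpre
  obtain ⟨hv, hlen, _htags⟩ := hpre
  unfold Spec_apply apply apply_alt
  cases hval : PySem.Dict.get? (PySem.Dict.mk rule) "value" with
  | none => rw [hval] at hv; simp at hv
  | some ruleValue =>
    simp only
    refine Prod.ext ?_ rfl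
    dsimp only
    rw [foldl_push_eq_map, List.nil_append]
    apply List.ext_getElem
    · rw [List.length_map, List.length_map, PySem.List.length_enumerate, List.length_zip]
      omega
    · intro k h1 h2
      have hkd : k < data.length := by
        simpa [PySem.List.length_enumerate] using h1
      have hks : k < sources.length := lt_of_lt_of_le hkd hlen
      rw [List.getElem_map, List.getElem_map, PySem.List.getElem_enumerate, List.getElem_zip]
      exact row_eq _ rule sources data[k] k hks
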